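-- pv_equiv track=rewrite | github.com/LaszloNguyen/MahjongPointCounter | tiles.py | remove_tiles
-- ===== SOURCE A (Python) =====
-- from collections import Counter
--
-- def remove_tiles(pool, tiles):
--     c = Counter(pool)
--     for t in tiles:
--         if c[t] == 0:
--             return None
--         c[t] -= 1
--     res = []
--     for t, n in c.items():
--         res += [t] * n
--     return tuple(sorted(res))
-- ===== SOURCE B (Python) =====
-- def remove_tiles(pool, tiles):
--     need = {}
--     for t in tiles:
--         need[t] = need.get(t, 0) + 1
--     res = []
--     for x in sorted(pool):
--         if need.get(x, 0):
--             need[x] -= 1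
--         else:
--             res.append(x)
--     if any(need.values()):
--         return None
--     return tuple(res)
-- ===== Notes on version B (the rewrite author's own statement) =====
-- stated objective: alternative
-- what changed: B inverts A's decomposition: instead of counting the pool, decrementing a count per tile and re-expanding the counter into a list to sort, B counts the tiles into a dict and makes one pass over the sorted pool, consuming needed tiles and keeping the rest, failing when any need is left over.
import Mathlib
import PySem

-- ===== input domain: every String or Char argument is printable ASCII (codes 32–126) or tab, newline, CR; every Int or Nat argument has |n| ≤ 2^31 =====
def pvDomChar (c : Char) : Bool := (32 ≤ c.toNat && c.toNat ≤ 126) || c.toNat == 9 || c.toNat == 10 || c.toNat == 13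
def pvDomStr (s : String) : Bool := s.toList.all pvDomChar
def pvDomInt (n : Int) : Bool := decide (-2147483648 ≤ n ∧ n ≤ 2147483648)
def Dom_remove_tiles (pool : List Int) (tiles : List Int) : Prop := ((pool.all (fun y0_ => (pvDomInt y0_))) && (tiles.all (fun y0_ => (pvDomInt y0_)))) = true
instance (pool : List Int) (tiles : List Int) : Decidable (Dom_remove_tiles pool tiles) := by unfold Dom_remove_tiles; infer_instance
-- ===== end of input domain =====

-- B inverts A's decomposition: instead of counting the POOL, decrementing per tile and re-expanding
-- the counter into a list to sort, B counts the TILES and filters the sorted pool in one pass.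

-- ===== PORT A =====
-- the 'for t in tiles' loop: return None when c[t] == 0, else c[t] -= 1
def removeTilesLoopA (c : PySem.Dict Int Int) (tiles : List Int) : Option (PySem.Dict Int Int) :=
  match tiles with
  | [] => some c
  | t :: ts =>
      if c.getD t 0 = 0 then none
      else removeTilesLoopA (c.insert t (c.getD t 0 - 1)) ts

def remove_tiles (pool : List Int) (tiles : List Int) : Option (List Int) :=
  let c := PySem.Dict.counter pool
  match removeTilesLoopA c tiles with
  | none => none
  | some c' =>
      let res := c'.items.foldl (fun acc p => acc ++ PySem.List.pyRepeat [p.1] p.2) []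
      some (PySem.List.sorted res (fun x => x) false)

-- ===== PORT B =====
-- body of 'for x in sorted(pool)': consume a needed tile or append x to res
def removeTilesScanB (s : PySem.Dict Int Int × List Int) (x : Int) : PySem.Dict Int Int × List Int :=
  if s.1.getD x 0 ≠ 0 then (s.1.insert x (s.1.getD x 0 - 1), s.2) else (s.1, s.2 ++ [x])

def remove_tiles_alt (pool : List Int) (tiles : List Int) : Option (List Int) :=
  let need := tiles.foldl (fun d t => d.insert t (d.getD t 0 + 1)) PySem.Dict.empty
  let out := (PySem.List.sorted pool (fun x => x) false).foldl removeTilesScanB (need, [])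
  if out.1.values.any (fun v => v != 0) then none else some out.2

-- ===== PRECONDITION & SPEC =====
def Spec_remove_tiles (pool : List Int) (tiles : List Int) (out : Option (List Int)) : Prop := out = remove_tiles_alt pool tiles
instance (pool : List Int) (tiles : List Int) (out : Option (List Int)) : Decidable (Spec_remove_tiles pool tiles out) := by unfold Spec_remove_tiles; infer_instance

-- ===== CLAIM (what is proved, stated in full; the proofs are below) =====
def Claim_equal_remove_tiles : Prop := ∀ (pool : List Int) (tiles : List Int), Dom_remove_tiles pool tiles → Spec_remove_tiles pool tiles (remove_tiles pool tiles)

-- ===== LEMMAS AND PROOFS =====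

-- Proof-side model of A's tile loop: erase one occurrence per tile from a plain list.
def rtEraseLoop (rest : List Int) (tiles : List Int) : Option (List Int) :=
  match tiles with
  | [] => some rest
  | t :: ts =>
      if t ∈ rest then rtEraseLoop (rest.erase t) ts
      else none

-- Invariant linking A's counter state to the model list: same multiset, nodup keys.
def RTInv (c : PySem.Dict Int Int) (rest : List Int) : Prop :=
  c.keys.Nodup ∧ ∀ v : Int, c.getD v 0 = (rest.count v : Int)

lemma rtinv_keys_insert (c : PySem.Dict Int Int) (t : Int) (v : Int)
    (h : c.contains t = true) : (c.insert t v).keys = c.keys := by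
  show ((c.insert t v).items.map (·.1)) = (c.items.map (·.1))
  rw [PySem.Dict.items_insert_of_contains c v h, List.map_map]
  apply List.map_congr_left
  intro p _
  by_cases hp : p.1 = t <;> simp [hp]

lemma rt_loop_agree (tiles : List Int) :
    ∀ (c : PySem.Dict Int Int) (rest : List Int), RTInv c rest →
      (removeTilesLoopA c tiles = none ∧ rtEraseLoop rest tiles = none) ∨
      (∃ c' r, removeTilesLoopA c tiles = some c' ∧ rtEraseLoop rest tiles = some r ∧ RTInv c' r) := by
  induction tiles with
  | nil =>
      intro c rest h
      exact Or.inr ⟨c, rest, rfl, rfl, h⟩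
  | cons t ts ih =>
      intro c rest h
      obtain ⟨hnd, hcnt⟩ := h
      by_cases hz : rest.count t = 0
      · left
        have hmem : t ∉ rest := by
          simpa [List.count_eq_zero] using hz
        constructor
        · simp [removeTilesLoopA, hcnt t, hz]
        · simp [rtEraseLoop, hmem]
      · have hmem : t ∈ rest := by
          rw [← List.count_pos_iff]; omega
        have hne : c.getD t 0 ≠ 0 := by
          rw [hcnt t]; exact_mod_cast hz
        have hcont : c.contains t = true := by
          by_contra hc
          exact hne (PySem.Dict.getD_of_not_contains c 0 (by simpa using hc))
        have hinv' : RTInv (c.insert t (c.getD t 0 - 1)) (rest.erase t) := by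
          refine ⟨by rw [rtinv_keys_insert c t _ hcont]; exact hnd, ?_⟩
          intro v
          rw [PySem.Dict.getD_insert, List.count_erase]
          by_cases hv : v = t
          · subst hv
            simp [hcnt v]
            have : 1 ≤ rest.count v := by omega
            omega
          · have : (t == v) = false := by simp [Ne.symm hv]
            simp [hv, this, hcnt v]
        have := ih (c.insert t (c.getD t 0 - 1)) (rest.erase t) hinv'
        rcases this with ⟨ha, hb⟩ | ⟨c', r, ha, hb, hinv⟩
        · left; constructor
          · simp [removeTilesLoopA, hne, ha]
          · simp [rtEraseLoop, hmem, hb]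
        · right
          exact ⟨c', r, by simp [removeTilesLoopA, hne, ha],
                 by simp [rtEraseLoop, hmem, hb], hinv⟩

-- characterization of the erase loop: success iff the tiles fit, with exact residual counts
lemma rtEraseLoop_some (tiles : List Int) :
    ∀ rest : List Int, (∀ v : Int, tiles.count v ≤ rest.count v) →
      ∃ r, rtEraseLoop rest tiles = some r ∧ ∀ v : Int, r.count v = rest.count v - tiles.count v := by
  induction tiles with
  | nil => intro rest _; exact ⟨rest, rfl, by simp⟩
  | cons t ts ih =>
      intro rest hle
      have hmem : t ∈ rest := by
        rw [← List.count_pos_iff]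
        have := hle t
        simp [List.count_cons_self] at this
        omega
      have hle' : ∀ v : Int, ts.count v ≤ (rest.erase t).count v := by
        intro v
        have := hle v
        rw [List.count_erase]
        rw [List.count_cons] at this
        by_cases hv : v = t
        · subst hv; simp at this ⊢; omega
        · have : ts.count v ≤ rest.count v := by
            have h2 := hle v; rw [List.count_cons] at h2; simp [hv] at h2; omega
          simp [Ne.symm hv]; omega
      obtain ⟨r, hr, hcnt⟩ := ih (rest.erase t) hle'
      refine ⟨r, by simp [rtEraseLoop, hmem, hr], ?_⟩
      intro v
      rw [hcnt v, List.count_erase, List.count_cons]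
      have h1 : 1 ≤ rest.count t := List.count_pos_iff.mpr hmem
      by_cases hv : v = t
      · subst hv; simp; omega
      · simp [hv, Ne.symm hv]

lemma rtEraseLoop_none (tiles : List Int) :
    ∀ rest : List Int, (¬ ∀ v : Int, tiles.count v ≤ rest.count v) →
      rtEraseLoop rest tiles = none := by
  induction tiles with
  | nil => intro rest h; exact absurd (fun v => by simp) h
  | cons t ts ih =>
      intro rest h
      push_neg at h
      obtain ⟨v, hv⟩ := h
      by_cases hmem : t ∈ rest
      · have : ¬ ∀ w : Int, ts.count w ≤ (rest.erase t).count w := by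
          push_neg
          refine ⟨v, ?_⟩
          rw [List.count_erase]
          rw [List.count_cons] at hv
          have h1 : 1 ≤ rest.count t := List.count_pos_iff.mpr hmem
          by_cases hvt : v = t
          · subst hvt
            simp at hv ⊢; omega
          · simp [hvt, Ne.symm hvt] at hv ⊢; omega
        simp [rtEraseLoop, hmem, ih _ this]
      · simp [rtEraseLoop, hmem]

-- counting in the re-expansion of a nodup key list
lemma count_flatMap_replicate (ks : List Int) (hnd : ks.Nodup) (f : Int → Nat) (v : Int) :
    (ks.flatMap (fun k => List.replicate (f k) k)).count v
      = if v ∈ ks then f v else 0 := by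
  induction ks with
  | nil => simp
  | cons k ks ih =>
      rw [List.nodup_cons] at hnd
      rw [List.flatMap_cons, List.count_append, List.count_replicate, ih hnd.2]
      by_cases hv : v = k
      · subst hv
        simp [hnd.1]
      · simp [hv, Ne.symm hv]

-- A's re-expanded result has the same counts as the residual list
lemma rt_res_perm (c : PySem.Dict Int Int) (r : List Int) (h : RTInv c r) :
    (c.items.foldl (fun acc p => acc ++ PySem.List.pyRepeat [p.1] p.2) []).Perm r := by
  obtain ⟨hnd, hcnt⟩ := h
  rw [PySem.List.foldl_append_eq_flatMap, List.nil_append]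
  rw [PySem.Dict.items_eq_map_keys c hnd 0, List.flatMap_map]
  rw [List.perm_iff_count]
  intro v
  have : (fun k => PySem.List.pyRepeat [(k, c.getD k 0).1] (k, c.getD k 0).2)
       = (fun k => List.replicate ((fun k => (c.getD k 0).toNat) k) k) := by
    funext k; simp [PySem.List.pyRepeat_singleton]
  rw [this, count_flatMap_replicate c.keys hnd (fun k => (c.getD k 0).toNat) v]
  by_cases hv : v ∈ c.keys
  · simp only [hv, if_pos]
    rw [hcnt v]; simp
  · simp only [hv, if_false]
    have hc : c.contains v = false := by
      rw [PySem.Dict.contains_eq_decide_mem_keys]; simpa using hv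
    have h0 := PySem.Dict.getD_of_not_contains c (0 : Int) hc
    have := (hcnt v).symm.trans h0
    omega

-- B's scan keeps the key list of the need dict
lemma rt_scan_keys (l : List Int) :
    ∀ (need : PySem.Dict Int Int) (res : List Int),
      (l.foldl removeTilesScanB (need, res)).1.keys = need.keys := by
  induction l with
  | nil => intro need res; rfl
  | cons x l ih =>
      intro need res
      rw [List.foldl_cons]
      by_cases hx : need.getD x 0 ≠ 0
      · have hcont : need.contains x = true := by
          by_contra hc
          exact hx (PySem.Dict.getD_of_not_contains need 0 (by simpa using hc))
        have hstep : removeTilesScanB (need, res) x = (need.insert x (need.getD x 0 - 1), res) := by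
          simp [removeTilesScanB, hx]
        rw [hstep, ih]
        exact rtinv_keys_insert need x _ hcont
      · push_neg at hx
        have hstep : removeTilesScanB (need, res) x = (need, res ++ [x]) := by
          simp [removeTilesScanB, hx]
        rw [hstep]
        exact ih _ _
-- B's scan: residual needs and exact counts of the appended survivors
lemma rt_scan_spec (l : List Int) :
    ∀ (need : PySem.Dict Int Int) (res : List Int),
      (∀ v : Int, 0 ≤ need.getD v 0) →
      (∀ v : Int, (l.foldl removeTilesScanB (need, res)).1.getD v 0
          = max (need.getD v 0 - l.count v) 0)
      ∧ ∃ sub, (l.foldl removeTilesScanB (need, res)).2 = res ++ sub ∧ sub.Sublist l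
          ∧ ∀ v : Int, (sub.count v : Int) = l.count v - min (need.getD v 0) (l.count v) := by
  induction l with
  | nil =>
      intro need res hnn
      constructor
      · intro v
        have := hnn v
        simp
        omega
      · exact ⟨[], by simp, by simp, fun v => by have := hnn v; simp; omega⟩
  | cons x l ih =>
      intro need res hnn
      rw [List.foldl_cons]
      by_cases hx : need.getD x 0 ≠ 0
      · have hxpos : 0 < need.getD x 0 := lt_of_le_of_ne (hnn x) (Ne.symm hx)
        have hstep : removeTilesScanB (need, res) x = (need.insert x (need.getD x 0 - 1), res) := by
          simp [removeTilesScanB, hx]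
        rw [hstep]
        have hnn' : ∀ v : Int, 0 ≤ (need.insert x (need.getD x 0 - 1)).getD v 0 := by
          intro v; rw [PySem.Dict.getD_insert]
          by_cases hv : v = x
          · simp [hv]; omega
          · simp [hv]; exact hnn v
        obtain ⟨hD, sub, hsub2, hsubl, hsubc⟩ := ih (need.insert x (need.getD x 0 - 1)) res hnn'
        refine ⟨?_, sub, hsub2, hsubl.cons x, ?_⟩
        · intro v
          rw [hD v, PySem.Dict.getD_insert, List.count_cons]
          by_cases hv : v = x
          · subst hv; simp; omega
          · simp [hv, Ne.symm hv]
        · intro v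
          rw [hsubc v, PySem.Dict.getD_insert, List.count_cons]
          by_cases hv : v = x
          · subst hv; simp; omega
          · simp [hv, Ne.symm hv]
      · push_neg at hx
        have hstep : removeTilesScanB (need, res) x = (need, res ++ [x]) := by
          simp [removeTilesScanB, hx]
        rw [hstep]
        obtain ⟨hD, sub, hsub2, hsubl, hsubc⟩ := ih need (res ++ [x]) hnn
        refine ⟨?_, x :: sub, by rw [hsub2]; simp, hsubl.cons₂ x, ?_⟩
        · intro v
          rw [hD v, List.count_cons]
          by_cases hv : v = x
          · subst hv; rw [hx]; simp
          · simp [hv, Ne.symm hv]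
        · intro v
          rw [List.count_cons, List.count_cons]
          have hnnv := hnn v
          by_cases hv : v = x
          · subst hv; push_cast; rw [hsubc v, hx]; simp; omega
          · simp [hv, Ne.symm hv]; rw [hsubc v]

-- ===== VERDICT (by name: the statement is the Claim_ definition above) =====
theorem remove_tiles_spec : Claim_equal_remove_tiles := by
  intro pool tiles _
  unfold Spec_remove_tiles remove_tiles remove_tiles_alt
  -- B's need dict is Counter(tiles)
  rw [PySem.Dict.foldl_insert_getD_add_one_eq_counter]
  have hneedD : ∀ v : Int, (PySem.Dict.counter tiles).getD v 0 = (tiles.count v : Int) :=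
    PySem.Dict.getD_counter tiles
  have hneednn : ∀ v : Int, 0 ≤ (PySem.Dict.counter tiles).getD v 0 := by
    intro v; rw [hneedD v]; positivity
  -- counts of the sorted pool are the counts of the pool
  have hsp : ∀ v : Int, (PySem.List.sorted pool (fun x => x) false).count v = pool.count v :=
    fun v => (PySem.List.sorted_perm pool (fun x => x) false).count_eq v
  obtain ⟨hD, sub, hsub2, hsubl, hsubc⟩ :=
    rt_scan_spec (PySem.List.sorted pool (fun x => x) false) (PySem.Dict.counter tiles) [] hneednn
  -- the leftover test decides exactly whether the tiles fit in the pool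
  have hkeys := rt_scan_keys (PySem.List.sorted pool (fun x => x) false) (PySem.Dict.counter tiles) []
  have hnd : ((PySem.List.sorted pool (fun x => x) false).foldl removeTilesScanB
      (PySem.Dict.counter tiles, [])).1.keys.Nodup := by
    rw [hkeys]; exact PySem.Dict.nodup_keys_counter tiles
  have hany : (((PySem.List.sorted pool (fun x => x) false).foldl removeTilesScanB
        (PySem.Dict.counter tiles, [])).1.values.any (fun v => v != 0)) = true
      ↔ ¬ ∀ v : Int, tiles.count v ≤ pool.count v := by
    rw [PySem.Dict.values_eq_map_keys _ hnd 0]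
    simp only [List.any_map, List.any_eq_true, Function.comp]
    constructor
    · rintro ⟨k, _, hk⟩
      have := hD k
      rw [hneedD k, hsp k] at this
      simp at hk
      rw [this] at hk
      push_neg
      exact ⟨k, by omega⟩
    · intro h
      push_neg at h
      obtain ⟨v, hv⟩ := h
      have hDv := hD v
      rw [hneedD v, hsp v] at hDv
      have hne : ((PySem.List.sorted pool (fun x => x) false).foldl removeTilesScanB
          (PySem.Dict.counter tiles, [])).1.getD v 0 ≠ 0 := by
        rw [hDv]; omega
      have hcont : ((PySem.List.sorted pool (fun x => x) false).foldl removeTilesScanB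
          (PySem.Dict.counter tiles, [])).1.contains v = true := by
        by_contra hc
        exact hne (PySem.Dict.getD_of_not_contains _ 0 (by simpa using hc))
      rw [PySem.Dict.contains_eq_decide_mem_keys] at hcont
      exact ⟨v, by simpa using hcont, by simpa using hne⟩
  have hAinv : RTInv (PySem.Dict.counter pool) pool :=
    ⟨PySem.Dict.nodup_keys_counter pool, fun v => PySem.Dict.getD_counter pool v⟩
  by_cases hfit : ∀ v : Int, tiles.count v ≤ pool.count v
  · -- tiles fit: both return the sorted difference
    have hany' : (((PySem.List.sorted pool (fun x => x) false).foldl removeTilesScanB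
        (PySem.Dict.counter tiles, [])).1.values.any (fun v => v != 0)) = false := by
      rw [← Bool.not_eq_true, hany]; exact not_not_intro hfit
    obtain ⟨r, hr, hrc⟩ := rtEraseLoop_some tiles pool hfit
    rcases rt_loop_agree tiles (PySem.Dict.counter pool) pool hAinv with ⟨_, hb⟩ | ⟨c', r', ha, hb, hinv⟩
    · rw [hr] at hb; exact absurd hb (by simp)
    · rw [hr] at hb
      obtain rfl : r = r' := by injection hb
      simp only [ha, hany']
      -- sorted res_A = sub
      have hperm1 := rt_res_perm c' r hinv
      have hperm2 : sub.Perm r := by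
        rw [List.perm_iff_count]
        intro v
        have h1 := hsubc v
        rw [hneedD v, hsp v] at h1
        have h2 := hrc v
        have h3 := hfit v
        omega
      have hperm : (PySem.List.sorted
          (c'.items.foldl (fun acc p => acc ++ PySem.List.pyRepeat [p.1] p.2) [])
          (fun x => x) false).Perm sub :=
        ((PySem.List.sorted_perm _ _ _).trans hperm1).trans hperm2.symm
      have hp1 : List.Pairwise (fun a b : Int => a ≤ b)
          (PySem.List.sorted (c'.items.foldl (fun acc p => acc ++ PySem.List.pyRepeat [p.1] p.2) [])
            (fun x => x) false) :=
        PySem.List.sorted_pairwise _ (fun x => x)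
      have hp2 : List.Pairwise (fun a b : Int => a ≤ b) sub :=
        (PySem.List.sorted_pairwise pool (fun x => x)).sublist hsubl
      have := PySem.List.eq_of_perm_of_pairwise_le_of_injective (fun x : Int => x)
        (fun a b h => h) hperm hp1 hp2
      rw [hsub2, List.nil_append]
      exact congrArg some this
  · -- some tile is missing: both return None
    have hany' := hany.mpr hfit
    have hnone := rtEraseLoop_none tiles pool hfit
    rcases rt_loop_agree tiles (PySem.Dict.counter pool) pool hAinv with ⟨ha, _⟩ | ⟨c', r', ha, hb, _⟩
    · simp [ha, hany']
    · rw [hnone] at hb; exact absurd hb (by simp)
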